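-- pv_equiv track=rewrite | github.com/kupalovmuhammadjon/Leetcode | 1422.py | maxScore
-- ===== SOURCE A (Python) =====
-- def maxScore(s: str) -> int:
--     mx = 0
--     for i in range(1, len(s), 1):
--        zero = list(s[:i])
--        one = list(s[i:])
--        if mx < zero.count("0") + one.count("1"):
--            mx = zero.count("0") + one.count("1")
--
--     return mx
-- ===== SOURCE B (Python) =====
-- def maxScore(s: str) -> int:
--     best = 0
--     zeros = 0
--     ones = s.count("1")
--     for ch in s[:-1]:
--         if ch == "0":
--             zeros += 1
--         elif ch == "1":
--             ones -= 1
--         if best < zeros + ones: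
--             best = zeros + ones
--     return best
-- ===== Notes on version B (the rewrite author's own statement) =====
-- stated objective: faster
-- what changed: Replaced the quadratic loop that recounts both slices at every split with a single left-to-right pass keeping running zero/one counts (prefix/suffix sums).
import Mathlib
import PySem

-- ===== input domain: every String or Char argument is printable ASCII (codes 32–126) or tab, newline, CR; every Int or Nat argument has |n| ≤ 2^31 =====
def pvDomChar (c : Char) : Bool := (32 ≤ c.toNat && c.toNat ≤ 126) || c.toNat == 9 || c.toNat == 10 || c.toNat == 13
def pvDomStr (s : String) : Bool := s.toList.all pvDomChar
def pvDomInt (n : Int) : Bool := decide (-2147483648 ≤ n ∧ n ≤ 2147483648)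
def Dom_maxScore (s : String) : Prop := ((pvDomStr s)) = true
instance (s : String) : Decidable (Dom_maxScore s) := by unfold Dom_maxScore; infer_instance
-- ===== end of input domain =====

-- B replaces A's quadratic recount of both slices at every split with one linear pass over
-- running zero/one counts; return values are proved equal on all inputs.

-- ===== PORT A =====
def maxScoreStep (cs : List Char) (mx : Int) (i : Int) : Int :=
  let zero := PySem.List.slice cs none (some i)
  let one := PySem.List.slice cs (some i) none
  if mx < (zero.count '0' : Int) + (one.count '1' : Int)
  then (zero.count '0' : Int) + (one.count '1' : Int)
  else mx

def maxScore (s : String) : Int :=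
  (PySem.List.pyRange 1 (s.toList.length : Int) 1).foldl (maxScoreStep s.toList) 0

-- ===== PORT B =====
def maxScoreAltStep (st : Int × Int × Int) (ch : Char) : Int × Int × Int :=
  let best := st.1
  let zeros := if ch = '0' then st.2.1 + 1 else st.2.1
  let ones := if ch = '0' then st.2.2 else if ch = '1' then st.2.2 - 1 else st.2.2
  let best := if best < zeros + ones then zeros + ones else best
  (best, zeros, ones)

def maxScore_alt (s : String) : Int :=
  ((PySem.List.slice s.toList none (some (-1))).foldl maxScoreAltStep
    (0, 0, (s.toList.count '1' : Int))).1

-- ===== PRECONDITION & SPEC =====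
def Spec_maxScore (s : String) (out : Int) : Prop := out = maxScore_alt s
instance (s : String) (out : Int) : Decidable (Spec_maxScore s out) := by unfold Spec_maxScore; infer_instance

-- ===== CLAIM (what is proved, stated in full; the proofs are below) =====
def Claim_equal_maxScore : Prop := ∀ (s : String), Dom_maxScore s → Spec_maxScore s (maxScore s)

-- ===== LEMMAS AND PROOFS =====

-- The loop invariant: with zeros = count of '0' in the processed prefix and
-- ones = count of '1' in the remaining suffix, B's fold over the suffix (minus its
-- last char) equals A's fold over the remaining split indices.
lemma key (suf : List Char) : ∀ (pre : List Char) (best : Int),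
    ((suf.dropLast).foldl maxScoreAltStep
        (best, (pre.count '0' : Int), (suf.count '1' : Int))).1
    = (PySem.List.pyRange ((pre.length : Int) + 1)
        ((pre.length : Int) + (suf.length : Int)) 1).foldl
        (maxScoreStep (pre ++ suf)) best := by
  induction suf with
  | nil =>
    intro pre best
    rw [PySem.List.pyRange_one_eq_nil (by simp)]
    simp
  | cons c tl ih =>
    intro pre best
    match tl with
    | [] =>
      rw [PySem.List.pyRange_one_eq_nil (by simp)]
      simp
    | c2 :: rest =>
      have hlt : (pre.length : Int) + 1 < (pre.length : Int) + ((c :: c2 :: rest).length : Int) := by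
        simp
      rw [PySem.List.pyRange_one_cons hlt]
      have hcast : (pre.length : Int) + 1 = (((pre.length + 1 : Nat)) : Int) := by push_cast; ring
      -- A's first step: count '0' in take (pre.length+1), count '1' in drop (pre.length+1)
      have hstep : maxScoreStep (pre ++ c :: c2 :: rest) best ((pre.length : Int) + 1)
          = (maxScoreAltStep (best, (pre.count '0' : Int), ((c :: c2 :: rest).count '1' : Int)) c).1 := by
        rw [hcast]
        simp only [maxScoreStep, PySem.List.slice_to_natCast, PySem.List.slice_from_natCast,
          maxScoreAltStep]
        have htake : (pre ++ c :: c2 :: rest).take (pre.length + 1) = pre ++ [c] := by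
          rw [show pre.length + 1 = pre.length + 1 from rfl, List.take_append]
          simp
        have hdrop : (pre ++ c :: c2 :: rest).drop (pre.length + 1) = c2 :: rest := by
          rw [List.drop_append]
          simp
        rw [htake, hdrop]
        by_cases h0 : c = '0' <;> by_cases h1 : c = '1' <;>
          simp [h0, h1, List.count_append, List.count_cons]
      have hzeros : (maxScoreAltStep (best, (pre.count '0' : Int), ((c :: c2 :: rest).count '1' : Int)) c).2.1
          = ((pre ++ [c]).count '0' : Int) := by
        by_cases h0 : c = '0' <;> simp [maxScoreAltStep, h0, List.count_append, List.count_cons]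
      have hones : (maxScoreAltStep (best, (pre.count '0' : Int), ((c :: c2 :: rest).count '1' : Int)) c).2.2
          = ((c2 :: rest).count '1' : Int) := by
        by_cases h0 : c = '0' <;> by_cases h1 : c = '1' <;>
          simp [maxScoreAltStep, h0, h1, List.count_cons]
      have hdl : (c :: c2 :: rest).dropLast = c :: (c2 :: rest).dropLast := rfl
      rw [hdl, List.foldl_cons]
      have hst : maxScoreAltStep (best, (pre.count '0' : Int), ((c :: c2 :: rest).count '1' : Int)) c
          = ((maxScoreAltStep (best, (pre.count '0' : Int), ((c :: c2 :: rest).count '1' : Int)) c).1,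
             ((pre ++ [c]).count '0' : Int), ((c2 :: rest).count '1' : Int)) := by
        rw [← hzeros, ← hones]
      rw [hst, ih (pre ++ [c])]
      rw [List.foldl_cons, hstep]
      have harr : pre ++ [c] ++ c2 :: rest = pre ++ c :: c2 :: rest := by simp
      have hb1 : ((pre ++ [c]).length : Int) + 1 = (pre.length : Int) + 1 + 1 := by simp
      have hb2 : ((pre ++ [c]).length : Int) + ((c2 :: rest).length : Int)
          = (pre.length : Int) + ((c :: c2 :: rest).length : Int) := by simp; ring_nf
      rw [harr, hb1, hb2]

-- ===== VERDICT (by name: the statement is the Claim_ definition above) =====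
theorem maxScore_spec : Claim_equal_maxScore := by
  intro s _
  unfold Spec_maxScore maxScore maxScore_alt
  rw [PySem.List.slice_to_neg_one]
  have := key s.toList [] 0
  simp only [List.count_nil, List.length_nil, List.nil_append, zero_add,
    CharP.cast_eq_zero] at this
  rw [this]
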